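-- pv_equiv track=rewrite | github.com/AlexanderLu98/RapGenerator | ColorCoder/colorCoder3.py | color_code_rhymes
-- ===== SOURCE A (Python) =====
-- def color_code_rhymes(lyrics):
--   # Split the lyrics into a list of lines
--   lines = lyrics.split('\n')
--
--   # Create a dictionary to store the rhymes
--   rhymes = {}
--
--   # Iterate over the lines
--   for line in lines:
--     # Split the line into words
--     words = line.split()
--     # Skip the line if it is empty or consists only of whitespace characters
--     if not words:
--       continue
--     # Get the last word in the line
--     last_word = words[-1]
--     # Get the rhyme by taking the last two syllables of the word
--     rhyme = last_word[-2:]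
--     # Add the rhyme to the dictionary, or increase the count if it already exists
--     if rhyme in rhymes:
--       rhymes[rhyme] += 1
--     else:
--       rhymes[rhyme] = 1
--
--   # Initialize the output string
--   output = ""
--
--   # Iterate over the lines again
--   for line in lines:
--     # Split the line into words
--     words = line.split()
--     # Skip the line if it is empty or consists only of whitespace characters
--     if not words:
--       continue
--     # Get the rhyme of the last word in the line
--     last_word = words[-1]
--     rhyme = last_word[-2:]
--     # Iterate over the words in the line
--     for word in words:
--       # Check if the word has the same rhyme as the last word in the line
--       if word[-2:] == rhyme:
--         # If the rhyme appears more than once, color the word red, otherwise color it green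
--         if rhymes[rhyme] > 1:
--           output += f"\033[91m{word}\033[0m "
--         else:
--           output += f"\033[92m{word}\033[0m "
--       else:
--         output += f"{word} "
--     output += "\n"
--
--   return output
-- ===== SOURCE B (Python) =====
-- def color_code_rhymes(lyrics):
--   # Single pass over the text: emit a flat token stream (plain text pieces and
--   # colour placeholders) while counting rhymes; resolve placeholders at the end.
--   frags = []     # str = literal output piece; (word, rhyme) = deferred colouring
--   counts = {}
--   for line in lyrics.split('\n'):
--     words = line.split()
--     if not words:
--       continue
--     rhyme = words[-1][-2:]
--     counts[rhyme] = counts.get(rhyme, 0) + 1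
--     for word in words:
--       if word[-2:] == rhyme:
--         frags.append((word, rhyme))
--       else:
--         frags.append(word + " ")
--     frags.append("\n")
--   return "".join(
--     f if isinstance(f, str)
--     else ("\033[91m" if counts[f[1]] > 1 else "\033[92m") + f[0] + "\033[0m "
--     for f in frags)
-- ===== Notes on version B (the rewrite author's own statement) =====
-- stated objective: alternative
-- what changed: B makes a single pass over the text, emitting a flat token stream of literal pieces and colour placeholders while counting rhymes, then resolves only the placeholders once the counts are final; A parses every line twice (one counting pass, one full re-parse to render).
import Mathlib
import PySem

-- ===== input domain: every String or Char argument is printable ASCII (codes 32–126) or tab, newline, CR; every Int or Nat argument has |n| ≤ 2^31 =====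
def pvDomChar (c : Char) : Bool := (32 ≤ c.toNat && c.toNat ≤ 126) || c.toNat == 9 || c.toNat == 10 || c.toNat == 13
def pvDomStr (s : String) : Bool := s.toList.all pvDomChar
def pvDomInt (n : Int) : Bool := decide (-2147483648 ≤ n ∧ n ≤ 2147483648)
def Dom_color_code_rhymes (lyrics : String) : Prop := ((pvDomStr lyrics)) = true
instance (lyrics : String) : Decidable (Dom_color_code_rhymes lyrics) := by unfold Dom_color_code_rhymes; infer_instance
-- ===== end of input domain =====

-- B makes a single pass over the text, emitting a token stream of literal pieces and colour
-- placeholders while counting rhymes, and resolves the placeholders at the end; A parses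
-- every line twice. Same return value, proved equal.

-- ===== PORT A =====
def color_code_rhymes (lyrics : String) : String :=
  let lines := (PySem.Str.split? lyrics "\n").getD [] -- sep nonempty: split? is always some
  let rhymes : PySem.Dict String Int := lines.foldl (fun d line =>
    let words := PySem.Str.split₀ line
    if words.isEmpty then d
    else
      let last_word := PySem.List.pyGetD words (-1) ""
      let rhyme := PySem.Str.slice last_word (some (-2)) none
      if d.contains rhyme then d.modify rhyme 0 (· + 1) else d.insert rhyme 1) PySem.Dict.empty
  lines.foldl (fun out line =>
    let words := PySem.Str.split₀ line
    if words.isEmpty then out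
    else
      let last_word := PySem.List.pyGetD words (-1) ""
      let rhyme := PySem.Str.slice last_word (some (-2)) none
      let out := words.foldl (fun out word =>
        if PySem.Str.slice word (some (-2)) none == rhyme then
          -- rhymes[rhyme]: the key is always present here; getD is exact
          if rhymes.getD rhyme 0 > 1 then out ++ "\x1b[91m" ++ word ++ "\x1b[0m "
          else out ++ "\x1b[92m" ++ word ++ "\x1b[0m "
        else out ++ word ++ " ") out
      out ++ "\n") ""

-- ===== PORT B =====
-- a token of B's output stream: a literal piece, or a colour placeholder (word, rhyme)
inductive PvFrag where
  | lit : String → PvFrag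
  | ph : String → String → PvFrag
deriving DecidableEq, Repr

def pvResolve (counts : PySem.Dict String Int) : PvFrag → String
  | .lit s => s
  | .ph word rhyme =>
      (if counts.getD rhyme 0 > 1 then "\x1b[91m" else "\x1b[92m") ++ word ++ "\x1b[0m "

def color_code_rhymes_alt (lyrics : String) : String :=
  -- sep "\n" ≠ "", so split? is always some
  let fc := ((PySem.Str.split? lyrics "\n").getD []).foldl
    (fun (acc : List PvFrag × PySem.Dict String Int) line =>
      let words := PySem.Str.split₀ line
      if words.isEmpty then acc
      else
        let rhyme := PySem.Str.slice (PySem.List.pyGetD words (-1) "") (some (-2)) none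
        let frags := words.foldl (fun fs word =>
          fs ++ [if PySem.Str.slice word (some (-2)) none == rhyme then
                   PvFrag.ph word rhyme
                 else PvFrag.lit (word ++ " ")]) acc.1
        (frags ++ [PvFrag.lit "\n"], acc.2.insert rhyme (acc.2.getD rhyme 0 + 1)))
    ([], PySem.Dict.empty)
  PySem.Str.join "" (fc.1.map (pvResolve fc.2))

-- ===== PRECONDITION & SPEC =====
def Spec_color_code_rhymes (lyrics : String) (out : String) : Prop := out = color_code_rhymes_alt lyrics
instance (lyrics : String) (out : String) : Decidable (Spec_color_code_rhymes lyrics out) := by unfold Spec_color_code_rhymes; infer_instance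

-- ===== CLAIM (what is proved, stated in full; the proofs are below) =====
def Claim_equal_color_code_rhymes : Prop := ∀ (lyrics : String), Dom_color_code_rhymes lyrics → Spec_color_code_rhymes lyrics (color_code_rhymes lyrics)

-- ===== LEMMAS AND PROOFS =====

-- helper names for the proofs: the loop bodies of the two ports, given names

def pvLines (lyrics : String) : List String := (PySem.Str.split? lyrics "\n").getD []

def pvParse (line : String) : Option (List String × String) :=
  if (PySem.Str.split₀ line).isEmpty then none
  else some (PySem.Str.split₀ line,
    PySem.Str.slice (PySem.List.pyGetD (PySem.Str.split₀ line) (-1) "") (some (-2)) none)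

def pvStepA1 (d : PySem.Dict String Int) (line : String) : PySem.Dict String Int :=
  let words := PySem.Str.split₀ line
  if words.isEmpty then d
  else
    let rhyme := PySem.Str.slice (PySem.List.pyGetD words (-1) "") (some (-2)) none
    if d.contains rhyme then d.modify rhyme 0 (· + 1) else d.insert rhyme 1

def pvCStepA (d : PySem.Dict String Int) (r : List String × String) : PySem.Dict String Int :=
  if d.contains r.2 then d.modify r.2 0 (· + 1) else d.insert r.2 1

def pvCStepB (d : PySem.Dict String Int) (r : List String × String) : PySem.Dict String Int :=
  d.insert r.2 (d.getD r.2 0 + 1)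

def pvFragOf (rhyme word : String) : PvFrag :=
  if PySem.Str.slice word (some (-2)) none == rhyme then PvFrag.ph word rhyme
  else PvFrag.lit (word ++ " ")

def pvFragsOf (r : List String × String) : List PvFrag :=
  r.1.map (pvFragOf r.2) ++ [PvFrag.lit "\n"]

def pvStepB (acc : List PvFrag × PySem.Dict String Int) (line : String) :
    List PvFrag × PySem.Dict String Int :=
  let words := PySem.Str.split₀ line
  if words.isEmpty then acc
  else
    let rhyme := PySem.Str.slice (PySem.List.pyGetD words (-1) "") (some (-2)) none
    let frags := words.foldl (fun fs word =>
      fs ++ [if PySem.Str.slice word (some (-2)) none == rhyme then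
               PvFrag.ph word rhyme
             else PvFrag.lit (word ++ " ")]) acc.1
    (frags ++ [PvFrag.lit "\n"], acc.2.insert rhyme (acc.2.getD rhyme 0 + 1))

def pvFmt (counts : PySem.Dict String Int) (rhyme : String) (word : String) : String :=
  if PySem.Str.slice word (some (-2)) none ≠ rhyme then word ++ " "
  else (if counts.getD rhyme 0 > 1 then "\x1b[91m" else "\x1b[92m") ++ word ++ "\x1b[0m "

def pvInner (cnt : PySem.Dict String Int) (rhyme : String) (out : String) (word : String) : String :=
  if PySem.Str.slice word (some (-2)) none == rhyme then
    if cnt.getD rhyme 0 > 1 then out ++ "\x1b[91m" ++ word ++ "\x1b[0m "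
    else out ++ "\x1b[92m" ++ word ++ "\x1b[0m "
  else out ++ word ++ " "

def pvStepA2 (cnt : PySem.Dict String Int) (out : String) (line : String) : String :=
  let words := PySem.Str.split₀ line
  if words.isEmpty then out
  else
    (words.foldl
      (pvInner cnt (PySem.Str.slice (PySem.List.pyGetD words (-1) "") (some (-2)) none)) out) ++ "\n"

def pvRender (cnt : PySem.Dict String Int) (recs : List (List String × String)) : String :=
  PySem.Str.join "" (recs.map (fun r => PySem.Str.join "" (r.1.map (pvFmt cnt r.2)) ++ "\n"))

theorem pvA_eq (lyrics : String) : color_code_rhymes lyrics =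
    (pvLines lyrics).foldl (pvStepA2 ((pvLines lyrics).foldl pvStepA1 PySem.Dict.empty)) "" := rfl

theorem pvB_eq (lyrics : String) : color_code_rhymes_alt lyrics =
    PySem.Str.join ""
      (((pvLines lyrics).foldl pvStepB ([], PySem.Dict.empty)).1.map
        (pvResolve ((pvLines lyrics).foldl pvStepB ([], PySem.Dict.empty)).2)) := rfl

theorem pvParse_none (line : String) (h : PySem.Str.split₀ line = []) : pvParse line = none := by
  simp [pvParse, h]

theorem pvParse_some (line : String) (h : ¬ PySem.Str.split₀ line = []) :
    pvParse line = some (PySem.Str.split₀ line,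
      PySem.Str.slice (PySem.List.pyGetD (PySem.Str.split₀ line) (-1) "") (some (-2)) none) := by
  simp [pvParse, h]

theorem pvIntercalate_nil_cons {α : Type} (a : List α) (l : List (List α)) :
    List.intercalate [] (a :: l) = a ++ List.intercalate [] l := by
  cases l <;> simp [List.intercalate]

theorem pvJoin_empty_cons (x : String) (xs : List String) :
    PySem.Str.join "" (x :: xs) = x ++ PySem.Str.join "" xs := by
  simp [PySem.Str.join, PySem.Chars.join, pvIntercalate_nil_cons]

theorem pvJoin_empty_nil : PySem.Str.join "" ([] : List String) = "" := rfl

theorem pvJoin_empty_append (xs ys : List String) :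
    PySem.Str.join "" (xs ++ ys) = PySem.Str.join "" xs ++ PySem.Str.join "" ys := by
  induction xs with
  | nil => simp [pvJoin_empty_nil]
  | cons x t ih => simp [pvJoin_empty_cons, ih, String.append_assoc]

theorem pvFlattenSingleton {α β : Type} (f : α → β) (t : List α) :
    (t.map (fun x => [f x])).flatten = t.map f := by
  induction t with
  | nil => rfl
  | cons x t ih => simp [ih]

-- the A-side count loop is the canonical count step over the parsed records
theorem pvL1 (lines : List String) (d : PySem.Dict String Int) :
    lines.foldl pvStepA1 d = (lines.filterMap pvParse).foldl pvCStepA d := by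
  induction lines generalizing d with
  | nil => rfl
  | cons line t ih =>
    by_cases h : PySem.Str.split₀ line = []
    · simp [List.foldl, pvStepA1, h, pvParse_none _ h, ih]
    · simp [List.foldl, pvStepA1, h, pvParse_some _ h, ih, pvCStepA]

-- B's single pass returns exactly (fragment stream of the parsed records, counts)
theorem pvL2 (lines : List String) (fs : List PvFrag) (d : PySem.Dict String Int) :
    lines.foldl pvStepB (fs, d) =
      (fs ++ (lines.filterMap pvParse).flatMap pvFragsOf,
       (lines.filterMap pvParse).foldl pvCStepB d) := by
  induction lines generalizing fs d with
  | nil => simp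
  | cons line t ih =>
    by_cases h : PySem.Str.split₀ line = []
    · simp [List.foldl, pvStepB, h, pvParse_none _ h, ih]
    · simp [List.foldl, pvStepB, h, pvParse_some _ h, ih, pvCStepB, pvFragsOf, pvFragOf, pvFlattenSingleton]

theorem pvL3 (recs : List (List String × String)) (d : PySem.Dict String Int) (k : String) :
    (recs.foldl pvCStepA d).getD k 0 = d.getD k 0 + ((recs.map Prod.snd).count k : Int) := by
  induction recs generalizing d with
  | nil => simp
  | cons r t ih =>
    have hmod := PySem.Dict.getD_foldl_modify_add_one [r.2] d k
    have hins := PySem.Dict.getD_foldl_insert_add_one [r.2] d k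
    simp [List.foldl] at hmod hins
    by_cases hc : d.contains r.2
    · simp [List.foldl, pvCStepA, hc, ih, hmod, List.count_cons]
      by_cases hk : r.2 = k <;> simp [hk] <;> ring
    · have h0 : d.getD r.2 0 = 0 := PySem.Dict.getD_of_not_contains d 0 (by simpa using hc)
      rw [h0, zero_add] at hins
      simp [List.foldl, pvCStepA, hc, ih, hins, List.count_cons]
      by_cases hk : r.2 = k <;> simp [hk] <;> ring

theorem pvL4 (recs : List (List String × String)) (d : PySem.Dict String Int) (k : String) :
    (recs.foldl pvCStepB d).getD k 0 = d.getD k 0 + ((recs.map Prod.snd).count k : Int) := by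
  have : recs.foldl pvCStepB d =
      (recs.map Prod.snd).foldl (fun d x => d.insert x (d.getD x 0 + 1)) d := by
    rw [List.foldl_map]; rfl
  rw [this, PySem.Dict.getD_foldl_insert_add_one]

-- resolving a fragment is exactly the A-side per-word formatting
theorem pvResolve_fragOf (cnt : PySem.Dict String Int) (rhyme word : String) :
    pvResolve cnt (pvFragOf rhyme word) = pvFmt cnt rhyme word := by
  by_cases h : PySem.Str.slice word (some (-2)) none = rhyme <;>
    simp [pvResolve, pvFragOf, pvFmt, h]

-- rendering the fragment stream equals the record-wise render
theorem pvL5 (cnt : PySem.Dict String Int) (recs : List (List String × String)) :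
    PySem.Str.join "" ((recs.flatMap pvFragsOf).map (pvResolve cnt)) = pvRender cnt recs := by
  induction recs with
  | nil => simp [pvRender, pvJoin_empty_nil]
  | cons r t ih =>
    simp only [List.flatMap_cons, List.map_append, pvJoin_empty_append, ih, pvRender,
      pvFragsOf, List.map_cons, List.map_map]
    simp only [Function.comp_def, pvResolve_fragOf]
    simp [pvJoin_empty_cons, pvJoin_empty_nil, pvResolve, String.append_assoc]

theorem pvFmt_congr (c1 c2 : PySem.Dict String Int)
    (h : ∀ k, c1.getD k 0 = c2.getD k 0) : pvFmt c1 = pvFmt c2 := by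
  funext r w; simp [pvFmt, h]

theorem pvRender_congr (c1 c2 : PySem.Dict String Int)
    (h : ∀ k, c1.getD k 0 = c2.getD k 0) (recs : List (List String × String)) :
    pvRender c1 recs = pvRender c2 recs := by
  simp [pvRender, pvFmt_congr c1 c2 h]

theorem pvL6 (cnt : PySem.Dict String Int) (rhyme : String) (words : List String) (out : String) :
    words.foldl (pvInner cnt rhyme) out = out ++ PySem.Str.join "" (words.map (pvFmt cnt rhyme)) := by
  induction words generalizing out with
  | nil => simp [pvJoin_empty_nil]
  | cons w t ih =>
    have hstep : pvInner cnt rhyme out w = out ++ pvFmt cnt rhyme w := by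
      by_cases h : PySem.Str.slice w (some (-2)) none = rhyme
      · by_cases hg : cnt.getD rhyme 0 > 1 <;>
          simp [pvInner, pvFmt, h, hg, String.append_assoc]
      · simp [pvInner, pvFmt, h, String.append_assoc]
    simp [List.foldl, hstep, ih, pvJoin_empty_cons, String.append_assoc]

theorem pvL7 (cnt : PySem.Dict String Int) (lines : List String) (out : String) :
    lines.foldl (pvStepA2 cnt) out = out ++ pvRender cnt (lines.filterMap pvParse) := by
  induction lines generalizing out with
  | nil => simp [pvRender, pvJoin_empty_nil]
  | cons line t ih =>
    by_cases h : PySem.Str.split₀ line = []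
    · simp [List.foldl, pvStepA2, h, pvParse_none _ h, ih]
    · simp [List.foldl, pvStepA2, h, pvParse_some _ h, ih, pvRender,
        pvL6, pvJoin_empty_cons, String.append_assoc]

-- ===== VERDICT (by name: the statement is the Claim_ definition above) =====
theorem color_code_rhymes_spec : Claim_equal_color_code_rhymes := by
  intro lyrics _
  unfold Spec_color_code_rhymes
  rw [pvA_eq, pvB_eq, pvL2, pvL1, pvL7]
  simp only [String.empty_append, List.nil_append]
  rw [pvL5]
  apply pvRender_congr
  intro k
  rw [pvL3, pvL4]
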